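-- pv_equiv track=rewrite | github.com/d8ahazard/overmind | app/api/routes/models.py | _pick_image
-- ===== SOURCE A (Python) =====
-- from typing import Dict, List, Optional
--
-- def _pick_image(models: List[str]) -> str | None:
--     if not models:
--         return None
--     priority = ["image", "dall-e-3", "dall-e-2"]
--     for tag in priority:
--         match = next((m for m in models if tag in m.lower()), None)
--         if match:
--             return match
--     return models[0]
-- ===== SOURCE B (Python) =====
-- def _pick_image(models):
--     if not models:
--         return None
--     priority = ["image", "dall-e-3", "dall-e-2"]
--
--     def rank(m):
--         ml = m.lower()
--         return next((i for i, tag in enumerate(priority) if tag in ml), len(priority))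
--
--     best = models[0]
--     best_rank = rank(best)
--     for m in models[1:]:
--         r = rank(m)
--         if r < best_rank:
--             best, best_rank = m, r
--     return best
-- ===== Notes on version B (the rewrite author's own statement) =====
-- stated objective: alternative
-- what changed: Replaced the tag-outer nested scan (for each priority tag, scan all models) by a single pass over the models that computes each model's priority rank once and keeps the first model with the strictly smallest rank; the len(priority) sentinel rank subsumes the models[0] fallback.
import Mathlib
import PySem

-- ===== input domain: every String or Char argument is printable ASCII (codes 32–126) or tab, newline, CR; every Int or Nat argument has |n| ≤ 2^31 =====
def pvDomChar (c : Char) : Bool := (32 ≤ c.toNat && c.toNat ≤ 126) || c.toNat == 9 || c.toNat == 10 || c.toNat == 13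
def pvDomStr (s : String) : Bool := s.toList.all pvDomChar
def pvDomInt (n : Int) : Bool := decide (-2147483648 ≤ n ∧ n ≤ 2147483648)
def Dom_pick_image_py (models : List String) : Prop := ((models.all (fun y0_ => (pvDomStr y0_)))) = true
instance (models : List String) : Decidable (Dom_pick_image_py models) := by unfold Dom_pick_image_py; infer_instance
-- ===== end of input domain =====

-- B replaces A's tag-outer nested scan by a single pass over the models keeping the
-- first model of strictly smallest priority rank (sentinel rank = number of tags
-- subsumes the models[0] fallback); alternative decomposition, no speed claim.

-- ===== PORT A =====
-- the 'for tag in priority' loop with early return; 'if match:' is the Python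
-- truthiness test on Optional[str] (None or "" falls through to the next tag)
def pickLoop (models : List String) : List String → Option String
  | [] => PySem.List.pyGet? models 0
  | tag :: rest =>
    match models.find? (fun m => PySem.Str.isIn tag (PySem.Str.lower m)) with
    | some m => if m ≠ "" then some m else pickLoop models rest
    | none => pickLoop models rest

def pick_image_py (models : List String) : Option String :=
  if models = [] then none
  else pickLoop models ["image", "dall-e-3", "dall-e-2"]

-- ===== PORT B =====
-- rank(m): index of the first priority tag contained in m.lower(), else len(priority)
def rankFrom (ml : String) : List String → Nat
  | [] => 0
  | tag :: rest => if PySem.Str.isIn tag ml then 0 else rankFrom ml rest + 1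

def pvRank (pr : List String) (m : String) : Nat := rankFrom (PySem.Str.lower m) pr

def pick_image_py_alt (models : List String) : Option String :=
  match models with
  | [] => none
  | m0 :: rest =>
    let pr := ["image", "dall-e-3", "dall-e-2"]
    let best := rest.foldl (fun (acc : String × Nat) m =>
        let r := pvRank pr m
        if r < acc.2 then (m, r) else acc) (m0, pvRank pr m0)
    some best.1

-- ===== PRECONDITION & SPEC =====
def Spec_pick_image_py (models : List String) (out : Option String) : Prop := out = pick_image_py_alt models
instance (models : List String) (out : Option String) : Decidable (Spec_pick_image_py models out) := by unfold Spec_pick_image_py; infer_instance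

-- ===== CLAIM (what is proved, stated in full; the proofs are below) =====
def Claim_equal_pick_image_py : Prop := ∀ (models : List String), Dom_pick_image_py models → Spec_pick_image_py models (pick_image_py models)

-- ===== LEMMAS AND PROOFS =====

-- the first element of b :: ms achieving the strictly smallest rank (B's loop, recursively)
def bestRec (pr : List String) (b : String) : List String → String
  | [] => b
  | m :: ms => if pvRank pr m < pvRank pr b then bestRec pr m ms else bestRec pr b ms

def pvFoldMin (pr : List String) (a : Nat) (ms : List String) : Nat :=
  ms.foldl (fun a m => min a (pvRank pr m)) a

def pvMins (pr : List String) (b : String) (ms : List String) : Nat :=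
  pvFoldMin pr (pvRank pr b) ms

theorem pvFoldMin_le (pr : List String) (ms : List String) (a : Nat) :
    pvFoldMin pr a ms ≤ a := by
  induction ms generalizing a with
  | nil => simp [pvFoldMin]
  | cons m ms ih =>
    calc pvFoldMin pr a (m :: ms) = pvFoldMin pr (min a (pvRank pr m)) ms := rfl
    _ ≤ min a (pvRank pr m) := ih _
    _ ≤ a := Nat.min_le_left _ _

theorem pvFoldMin_le_mem (pr : List String) (ms : List String) (a : Nat) (x : String)
    (hx : x ∈ ms) : pvFoldMin pr a ms ≤ pvRank pr x := by
  induction ms generalizing a with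
  | nil => cases hx
  | cons m ms ih =>
    rcases List.mem_cons.mp hx with h | h
    · subst h
      calc pvFoldMin pr a (x :: ms) = pvFoldMin pr (min a (pvRank pr x)) ms := rfl
      _ ≤ min a (pvRank pr x) := pvFoldMin_le _ _ _
      _ ≤ pvRank pr x := Nat.min_le_right _ _
    · exact ih _ h

theorem pvFoldMin_succ (pr pr' : List String) (ms : List String)
    (h : ∀ x ∈ ms, pvRank pr' x = pvRank pr x + 1) (a : Nat) :
    pvFoldMin pr' (a + 1) ms = pvFoldMin pr a ms + 1 := by
  induction ms generalizing a with
  | nil => simp [pvFoldMin]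
  | cons m ms ih =>
    have hm : pvRank pr' m = pvRank pr m + 1 := h m List.mem_cons_self
    have : min (a + 1) (pvRank pr' m) = min a (pvRank pr m) + 1 := by
      rw [hm]; omega
    show pvFoldMin pr' (min (a + 1) (pvRank pr' m)) ms = pvFoldMin pr (min a (pvRank pr m)) ms + 1
    rw [this]
    exact ih (fun x hx => h x (List.mem_cons_of_mem _ hx)) _

theorem find?_congr_mem {α : Type} (l : List α) (p q : α → Bool)
    (h : ∀ x ∈ l, p x = q x) : l.find? p = l.find? q := by
  induction l with
  | nil => rfl
  | cons m l ih =>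
    have hm := h m List.mem_cons_self
    by_cases hp : p m = true
    · rw [List.find?_cons_of_pos hp, List.find?_cons_of_pos (hm ▸ hp)]
    · rw [List.find?_cons_of_neg hp, List.find?_cons_of_neg (hm ▸ hp),
        ih (fun x hx => h x (List.mem_cons_of_mem _ hx))]

-- B's fold keeps the invariant (best, rank best)
theorem foldl_bestRec (pr : List String) (ms : List String) (b : String) :
    ms.foldl (fun (acc : String × Nat) m =>
        let r := pvRank pr m
        if r < acc.2 then (m, r) else acc) (b, pvRank pr b)
      = (bestRec pr b ms, pvRank pr (bestRec pr b ms)) := by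
  induction ms generalizing b with
  | nil => rfl
  | cons m ms ih =>
    show ms.foldl _ (if pvRank pr m < pvRank pr b then (m, pvRank pr m) else (b, pvRank pr b)) = _
    by_cases h : pvRank pr m < pvRank pr b <;> simp [h, bestRec, ih]

-- bestRec returns the first element of b :: ms whose rank is the minimum rank
theorem find?_bestRec (pr : List String) (ms : List String) (b : String) :
    (b :: ms).find? (fun x => pvRank pr x == pvMins pr b ms) = some (bestRec pr b ms) := by
  induction ms generalizing b with
  | nil => simp [pvMins, pvFoldMin, bestRec, List.find?]
  | cons m ms ih =>
    have hunf : pvMins pr b (m :: ms) = pvFoldMin pr (min (pvRank pr b) (pvRank pr m)) ms := rfl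
    by_cases h : pvRank pr m < pvRank pr b
    · have hmin : min (pvRank pr b) (pvRank pr m) = pvRank pr m := by omega
      have hμ : pvMins pr b (m :: ms) = pvMins pr m ms := by rw [hunf, hmin]; rfl
      have hlt : pvMins pr m ms < pvRank pr b :=
        lt_of_le_of_lt (pvFoldMin_le pr ms (pvRank pr m)) h
      have hb : ¬ ((fun x => pvRank pr x == pvMins pr m ms) b) = true := by
        simp; omega
      rw [hμ, List.find?_cons_of_neg (p := fun x => pvRank pr x == pvMins pr m ms) hb]
      simpa [bestRec, h] using ih m
    · have hmin : min (pvRank pr b) (pvRank pr m) = pvRank pr b := by omega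
      have hμ : pvMins pr b (m :: ms) = pvMins pr b ms := by rw [hunf, hmin]; rfl
      have hle : pvMins pr b ms ≤ pvRank pr b := pvFoldMin_le pr ms (pvRank pr b)
      rw [hμ]
      by_cases hb : pvRank pr b = pvMins pr b ms
      · have h1 : ((fun x => pvRank pr x == pvMins pr b ms) b) = true := by simp [hb]
        rw [List.find?_cons_of_pos (p := fun x => pvRank pr x == pvMins pr b ms) h1]
        have := ih b
        rw [List.find?_cons_of_pos (p := fun x => pvRank pr x == pvMins pr b ms) h1] at this
        simpa [bestRec, h] using this
      · have h1 : ¬ ((fun x => pvRank pr x == pvMins pr b ms) b) = true := by simp [hb]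
        have hm1 : ¬ ((fun x => pvRank pr x == pvMins pr b ms) m) = true := by
          simp; intro he; omega
        rw [List.find?_cons_of_neg (p := fun x => pvRank pr x == pvMins pr b ms) h1,
            List.find?_cons_of_neg (p := fun x => pvRank pr x == pvMins pr b ms) hm1]
        have := ih b
        rw [List.find?_cons_of_neg (p := fun x => pvRank pr x == pvMins pr b ms) h1] at this
        simpa [bestRec, h] using this

-- A's tag loop returns the first model of minimum rank (tags never match the empty string)
theorem pickLoop_eq_find? (pr : List String)
    (hpr : ∀ t ∈ pr, ∀ m : String, PySem.Str.isIn t (PySem.Str.lower m) = true → m ≠ "")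
    (m0 : String) (rest : List String) :
    pickLoop (m0 :: rest) pr
      = (m0 :: rest).find? (fun x => pvRank pr x == pvMins pr m0 rest) := by
  induction pr with
  | nil =>
    have hr : pvRank [] m0 = 0 := rfl
    have hμ : pvMins [] m0 rest = 0 := by
      have := pvFoldMin_le [] rest (pvRank [] m0)
      rw [hr] at this
      exact Nat.le_zero.mp this
    rw [hμ]
    have h1 : ((fun x => pvRank [] x == 0) m0) = true := by simp [pvRank, rankFrom]
    rw [List.find?_cons_of_pos (p := fun x => pvRank [] x == 0) h1]
    simp [pickLoop, PySem.List.pyGet?, PySem.List.pyIdx?]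
  | cons t ts ih =>
    have hrank : ∀ x : String, pvRank (t :: ts) x
        = if PySem.Str.isIn t (PySem.Str.lower x) then 0 else pvRank ts x + 1 := fun x => rfl
    cases hf : (m0 :: rest).find? (fun m => PySem.Str.isIn t (PySem.Str.lower m)) with
    | some m =>
      have hmem : m ∈ m0 :: rest := List.mem_of_find?_eq_some hf
      have hpm : PySem.Str.isIn t (PySem.Str.lower m) = true :=
        List.find?_some (p := fun m => PySem.Str.isIn t (PySem.Str.lower m)) hf
      have hne : m ≠ "" := hpr t List.mem_cons_self m hpm
      have hLHS : pickLoop (m0 :: rest) (t :: ts) = some m := by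
        show (match (m0 :: rest).find? (fun m => PySem.Str.isIn t (PySem.Str.lower m)) with
          | some m => if m ≠ "" then some m else pickLoop (m0 :: rest) ts
          | none => pickLoop (m0 :: rest) ts) = some m
        rw [hf]
        simp [hne]
      have hr0 : pvRank (t :: ts) m = 0 := by rw [hrank, if_pos hpm]
      have hμ : pvMins (t :: ts) m0 rest = 0 := by
        rcases List.mem_cons.mp hmem with h | h
        · subst h
          have h2 := pvFoldMin_le (t :: ts) rest (pvRank (t :: ts) m)
          have : pvMins (t :: ts) m rest ≤ pvRank (t :: ts) m := h2
          omega
        · have h2 := pvFoldMin_le_mem (t :: ts) rest (pvRank (t :: ts) m0) m h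
          have : pvMins (t :: ts) m0 rest ≤ pvRank (t :: ts) m := h2
          omega
      have hpred : (fun x => pvRank (t :: ts) x == 0)
          = (fun m => PySem.Str.isIn t (PySem.Str.lower m)) := by
        funext x
        rw [hrank]
        by_cases hx : PySem.Str.isIn t (PySem.Str.lower x) = true
        · rw [if_pos hx, hx]; rfl
        · rw [Bool.not_eq_true] at hx
          rw [if_neg (by rw [hx]; simp), hx]
          simp
      rw [hLHS, hμ, hpred, hf]
    | none =>
      have hnone : ∀ x ∈ m0 :: rest, PySem.Str.isIn t (PySem.Str.lower x) = false := by
        intro x hx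
        simpa using List.find?_eq_none.mp hf x hx
      have hsucc : ∀ x ∈ m0 :: rest, pvRank (t :: ts) x = pvRank ts x + 1 := by
        intro x hx
        rw [hrank, if_neg (by rw [hnone x hx]; simp)]
      have hLHS : pickLoop (m0 :: rest) (t :: ts) = pickLoop (m0 :: rest) ts := by
        show (match (m0 :: rest).find? (fun m => PySem.Str.isIn t (PySem.Str.lower m)) with
          | some m => if m ≠ "" then some m else pickLoop (m0 :: rest) ts
          | none => pickLoop (m0 :: rest) ts) = pickLoop (m0 :: rest) ts
        rw [hf]
      have hμ : pvMins (t :: ts) m0 rest = pvMins ts m0 rest + 1 := by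
        show pvFoldMin (t :: ts) (pvRank (t :: ts) m0) rest = _
        rw [hsucc m0 List.mem_cons_self]
        exact pvFoldMin_succ ts (t :: ts) rest
          (fun x hx => hsucc x (List.mem_cons_of_mem _ hx)) _
      have hts : ∀ t' ∈ ts, ∀ m : String, PySem.Str.isIn t' (PySem.Str.lower m) = true → m ≠ "" :=
        fun t' ht' => hpr t' (List.mem_cons_of_mem _ ht')
      rw [hLHS, ih hts, hμ]
      apply find?_congr_mem
      intro x hx
      rw [hsucc x hx]
      by_cases hx2 : pvRank ts x = pvMins ts m0 rest <;> simp [hx2] <;> omega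

theorem hpr_concrete :
    ∀ t ∈ (["image", "dall-e-3", "dall-e-2"] : List String),
      ∀ m : String, PySem.Str.isIn t (PySem.Str.lower m) = true → m ≠ "" := by
  intro t ht m hm he
  subst he
  fin_cases ht <;> revert hm <;> decide

-- ===== VERDICT (by name: the statement is the Claim_ definition above) =====
theorem pick_image_py_spec : Claim_equal_pick_image_py := by
  intro models _
  unfold Spec_pick_image_py
  cases models with
  | nil => rfl
  | cons m0 rest =>
    show pick_image_py (m0 :: rest) = pick_image_py_alt (m0 :: rest)
    rw [pick_image_py]
    simp only [if_neg (List.cons_ne_nil m0 rest)]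
    rw [pickLoop_eq_find? _ hpr_concrete, find?_bestRec]
    show _ = some (rest.foldl _ (m0, pvRank _ m0)).1
    rw [foldl_bestRec]
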